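-- pv_equiv track=rewrite | github.com/carlos-crespo-macaya/re-frame | backend/agents/act_framework_agent.py | select_hexaflex_process
-- ===== SOURCE A (Python) =====
-- def select_hexaflex_process(thought: str, categories: list[str]) -> str:
--     """Select the most appropriate ACT process based on thought content."""
--     thought_lower = thought.lower()
--
--     # Self-as-Context for identity fusion
--     if any(phrase in thought_lower for phrase in ["i am", "i'm broken", "i'm damaged"]) and any(
--         cat in categories for cat in ["identity", "self-concept"]
--     ):
--         return "Self-as-Context"
--
--     # Acceptance for emotional struggle
--     if any(
--         phrase in thought_lower
--         for phrase in ["can't stand", "can't handle", "too much", "unbearable"]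
--     ) or any(cat in categories for cat in ["avoidance", "struggle"]):
--         return "Acceptance"
--
--     # Present Moment for time travel
--     if any(cat in categories for cat in ["future", "worry", "past", "rumination"]):
--         return "Present Moment"
--
--     # Values for meaninglessness
--     if any(
--         phrase in thought_lower
--         for phrase in ["what's the point", "why bother", "doesn't matter"]
--     ) or any(cat in categories for cat in ["values", "meaning"]):
--         return "Values Clarification"
--
--     # Defusion for thought believability
--     if any(cat in categories for cat in ["catastrophizing", "fusion", "prediction"]):
--         return "Cognitive Defusion"
--
--     # Default to Committed Action
--     return "Committed Action"
-- ===== SOURCE B (Python) =====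
-- _CAT_RULE = {
--     "identity": 0, "self-concept": 0,
--     "avoidance": 1, "struggle": 1,
--     "future": 2, "worry": 2, "past": 2, "rumination": 2,
--     "values": 3, "meaning": 3,
--     "catastrophizing": 4, "fusion": 4, "prediction": 4,
-- }
--
-- _NAMES = ["Self-as-Context", "Acceptance", "Present Moment",
--           "Values Clarification", "Cognitive Defusion", "Committed Action"]
--
--
-- def select_hexaflex_process(thought: str, categories: list[str]) -> str:
--     """Priority-index selection: one pass over categories through an inverted
--     category->rule index computes the minimal triggered rule; phrase rules
--     then lower the index where they apply."""
--     tl = thought.lower()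
--     c0 = False   # a category of the self-as-context rule was seen
--     best = 5     # minimal rule index in 1..4 triggered by a category (5 = none)
--     for c in categories:
--         r = _CAT_RULE.get(c)
--         if r == 0:
--             c0 = True
--         elif r is not None and r < best:
--             best = r
--     if c0 and any(p in tl for p in ["i am", "i'm broken", "i'm damaged"]):
--         return _NAMES[0]
--     if best > 1 and any(p in tl for p in ["can't stand", "can't handle", "too much", "unbearable"]):
--         best = 1
--     if best > 3 and any(p in tl for p in ["what's the point", "why bother", "doesn't matter"]):
--         best = 3
--     return _NAMES[best]
-- ===== Notes on version B (the rewrite author's own statement) =====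
-- stated objective: alternative
-- what changed: Instead of A's five if-statements each rescanning the categories list per rule, B makes one pass over categories through an inverted category-to-rule-index dict, keeping the minimal triggered rule index (plus a flag for the AND-combined first rule), then lets the phrase rules lower that index and returns the name at the final index.
import Mathlib
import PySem

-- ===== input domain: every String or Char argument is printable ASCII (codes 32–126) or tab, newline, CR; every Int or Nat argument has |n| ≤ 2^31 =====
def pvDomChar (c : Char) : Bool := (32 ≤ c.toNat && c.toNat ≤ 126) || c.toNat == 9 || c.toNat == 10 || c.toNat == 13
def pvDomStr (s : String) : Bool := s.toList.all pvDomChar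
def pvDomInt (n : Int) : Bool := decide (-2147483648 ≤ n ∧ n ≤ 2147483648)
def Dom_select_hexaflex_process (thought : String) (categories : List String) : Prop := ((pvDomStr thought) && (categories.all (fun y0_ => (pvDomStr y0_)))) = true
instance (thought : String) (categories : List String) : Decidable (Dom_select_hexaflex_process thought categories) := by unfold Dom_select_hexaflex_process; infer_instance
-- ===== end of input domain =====

-- B replaces A's chain of per-rule category scans by one pass over the categories through an
-- inverted category→rule-index dict that keeps the minimal triggered rule index (alternative decomposition; same cost).

-- ===== PORT A =====
def select_hexaflex_process (thought : String) (categories : List String) : String :=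
  let thought_lower := PySem.Str.lower thought
  if (["i am", "i'm broken", "i'm damaged"].any (fun phrase => PySem.Str.isIn phrase thought_lower)) &&
     (["identity", "self-concept"].any (fun cat => categories.contains cat)) then
    "Self-as-Context"
  else if (["can't stand", "can't handle", "too much", "unbearable"].any
             (fun phrase => PySem.Str.isIn phrase thought_lower)) ||
          (["avoidance", "struggle"].any (fun cat => categories.contains cat)) then
    "Acceptance"
  else if ["future", "worry", "past", "rumination"].any (fun cat => categories.contains cat) then
    "Present Moment"
  else if (["what's the point", "why bother", "doesn't matter"].any
             (fun phrase => PySem.Str.isIn phrase thought_lower)) ||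
          (["values", "meaning"].any (fun cat => categories.contains cat)) then
    "Values Clarification"
  else if ["catastrophizing", "fusion", "prediction"].any (fun cat => categories.contains cat) then
    "Cognitive Defusion"
  else
    "Committed Action"

-- ===== PORT B =====
-- the inverted index _CAT_RULE of Source B
def catRule : PySem.Dict String Int :=
  PySem.Dict.ofList [("identity",0),("self-concept",0),("avoidance",1),("struggle",1),
    ("future",2),("worry",2),("past",2),("rumination",2),("values",3),("meaning",3),
    ("catastrophizing",4),("fusion",4),("prediction",4)]

-- _NAMES of Source B
def hexaNames : List String :=
  ["Self-as-Context", "Acceptance", "Present Moment",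
   "Values Clarification", "Cognitive Defusion", "Committed Action"]

def select_hexaflex_process_alt (thought : String) (categories : List String) : String :=
  let tl := PySem.Str.lower thought
  -- the category loop: (c0, best); `r = _CAT_RULE.get(c); if r == 0 … elif r is not None and r < best …`
  let st := categories.foldl (fun (st : Bool × Int) c =>
      match PySem.Dict.get? catRule c with
      | none => st
      | some r => if r == 0 then (true, st.2) else if r < st.2 then (st.1, r) else st)
    (false, 5)
  if st.1 && (["i am", "i'm broken", "i'm damaged"].any (fun p => PySem.Str.isIn p tl)) then
    PySem.List.pyGetD hexaNames 0 ""   -- _NAMES[0]; index always in range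
  else
    let best := if decide (1 < st.2) &&
        (["can't stand", "can't handle", "too much", "unbearable"].any (fun p => PySem.Str.isIn p tl))
      then 1 else st.2
    let best := if decide (3 < best) &&
        (["what's the point", "why bother", "doesn't matter"].any (fun p => PySem.Str.isIn p tl))
      then 3 else best
    PySem.List.pyGetD hexaNames best ""   -- _NAMES[best]; best ∈ {1,…,5}, always in range

-- ===== PRECONDITION & SPEC =====
def Spec_select_hexaflex_process (thought : String) (categories : List String) (out : String) : Prop := out = select_hexaflex_process_alt thought categories
instance (thought : String) (categories : List String) (out : String) : Decidable (Spec_select_hexaflex_process thought categories out) := by unfold Spec_select_hexaflex_process; infer_instance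

-- ===== CLAIM (what is proved, stated in full; the proofs are below) =====
def Claim_equal_select_hexaflex_process : Prop := ∀ (thought : String) (categories : List String), Dom_select_hexaflex_process thought categories → Spec_select_hexaflex_process thought categories (select_hexaflex_process thought categories)

-- ===== LEMMAS AND PROOFS =====
def cHit (categories g : List String) : Bool := g.any (fun cat => categories.contains cat)
def mval (categories : List String) : Int :=
  if cHit categories ["avoidance", "struggle"] then 1
  else if cHit categories ["future", "worry", "past", "rumination"] then 2
  else if cHit categories ["values", "meaning"] then 3
  else if cHit categories ["catastrophizing", "fusion", "prediction"] then 4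
  else 5
theorem cHit_cons (c : String) (cs g : List String) : cHit (c::cs) g = (g.contains c || cHit cs g) := by
  induction g with
  | nil => simp [cHit]
  | cons x g ihg =>
    simp only [cHit, List.any_cons, List.contains_cons] at *
    rw [ihg]
    by_cases hx : c = x
    · subst hx; simp [Bool.or_left_comm, Bool.or_assoc]
    · rw [BEq.comm]; simp [Bool.or_left_comm, Bool.or_assoc]
theorem catRule_get (c : String) : PySem.Dict.get? catRule c =
  (if "identity" = c then some 0 else if "self-concept" = c then some 0 else
   if "avoidance" = c then some 1 else if "struggle" = c then some 1 else
   if "future" = c then some 2 else if "worry" = c then some 2 else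
   if "past" = c then some 2 else if "rumination" = c then some 2 else
   if "values" = c then some 3 else if "meaning" = c then some 3 else
   if "catastrophizing" = c then some 4 else if "fusion" = c then some 4 else
   if "prediction" = c then some 4 else none) := by
  have h : catRule = PySem.Dict.mk [("identity",0),("self-concept",0),("avoidance",1),("struggle",1),
    ("future",2),("worry",2),("past",2),("rumination",2),("values",3),("meaning",3),
    ("catastrophizing",4),("fusion",4),("prediction",4)] := by decide
  rw [h]
  simp only [PySem.Dict.get?_mk_cons, beq_iff_eq]
  rfl


theorem mval_bounds (categories : List String) : 1 ≤ mval categories ∧ mval categories ≤ 5 := by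
  unfold mval; split_ifs <;> omega

set_option maxHeartbeats 2000000 in
theorem foldl_catRule (cs : List String) : ∀ (b : Bool) (m : Int), m ≤ 5 →
    cs.foldl (fun (st : Bool × Int) c =>
      match PySem.Dict.get? catRule c with
      | none => st
      | some r => if r == 0 then (true, st.2) else if r < st.2 then (st.1, r) else st)
      (b, m)
    = (b || cHit cs ["identity", "self-concept"], min m (mval cs)) := by
  induction cs with
  | nil =>
    intro b m hm
    refine Prod.ext (by simp [cHit]) ?_
    simp [cHit, mval]
    omega
  | cons c cs ih =>
    intro b m hm
    simp only [List.foldl_cons]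
    rw [catRule_get c]
    by_cases h0 : "identity" = c
    · subst h0
      rw [if_pos rfl]
      simp only []
      rw [if_pos (by decide), ih _ _ hm]
      refine Prod.ext ?_ ?_ <;> simp [cHit_cons, mval] <;> first | (split_ifs <;> first | rfl | omega | simp) | rfl | omega | simp
    rw [if_neg h0]
    by_cases h1 : "self-concept" = c
    · subst h1
      rw [if_pos rfl]
      simp only []
      rw [if_pos (by decide), ih _ _ hm]
      refine Prod.ext ?_ ?_ <;> simp [cHit_cons, mval] <;> first | (split_ifs <;> first | rfl | omega | simp) | rfl | omega | simp
    rw [if_neg h1]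
    by_cases h2 : "avoidance" = c
    · subst h2
      rw [if_pos rfl]
      simp only []
      rw [if_neg (by decide)]
      by_cases hlt : (1:Int) < m
      · rw [if_pos hlt, ih _ _ (by omega)]
        refine Prod.ext ?_ ?_ <;> simp [cHit_cons, mval] <;> first | (split_ifs <;> first | rfl | omega | simp) | rfl | omega | simp
      · rw [if_neg hlt, ih _ _ hm]
        refine Prod.ext ?_ ?_ <;> simp [cHit_cons, mval] <;> first | (split_ifs <;> first | rfl | omega | simp) | rfl | omega | simp
    rw [if_neg h2]
    by_cases h3 : "struggle" = c
    · subst h3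
      rw [if_pos rfl]
      simp only []
      rw [if_neg (by decide)]
      by_cases hlt : (1:Int) < m
      · rw [if_pos hlt, ih _ _ (by omega)]
        refine Prod.ext ?_ ?_ <;> simp [cHit_cons, mval] <;> first | (split_ifs <;> first | rfl | omega | simp) | rfl | omega | simp
      · rw [if_neg hlt, ih _ _ hm]
        refine Prod.ext ?_ ?_ <;> simp [cHit_cons, mval] <;> first | (split_ifs <;> first | rfl | omega | simp) | rfl | omega | simp
    rw [if_neg h3]
    by_cases h4 : "future" = c
    · subst h4
      rw [if_pos rfl]
      simp only []
      rw [if_neg (by decide)]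
      by_cases hlt : (2:Int) < m
      · rw [if_pos hlt, ih _ _ (by omega)]
        refine Prod.ext ?_ ?_ <;> simp [cHit_cons, mval] <;> first | (split_ifs <;> first | rfl | omega | simp) | rfl | omega | simp
      · rw [if_neg hlt, ih _ _ hm]
        refine Prod.ext ?_ ?_ <;> simp [cHit_cons, mval] <;> first | (split_ifs <;> first | rfl | omega | simp) | rfl | omega | simp
    rw [if_neg h4]
    by_cases h5 : "worry" = c
    · subst h5
      rw [if_pos rfl]
      simp only []
      rw [if_neg (by decide)]
      by_cases hlt : (2:Int) < m
      · rw [if_pos hlt, ih _ _ (by omega)]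
        refine Prod.ext ?_ ?_ <;> simp [cHit_cons, mval] <;> first | (split_ifs <;> first | rfl | omega | simp) | rfl | omega | simp
      · rw [if_neg hlt, ih _ _ hm]
        refine Prod.ext ?_ ?_ <;> simp [cHit_cons, mval] <;> first | (split_ifs <;> first | rfl | omega | simp) | rfl | omega | simp
    rw [if_neg h5]
    by_cases h6 : "past" = c
    · subst h6
      rw [if_pos rfl]
      simp only []
      rw [if_neg (by decide)]
      by_cases hlt : (2:Int) < m
      · rw [if_pos hlt, ih _ _ (by omega)]
        refine Prod.ext ?_ ?_ <;> simp [cHit_cons, mval] <;> first | (split_ifs <;> first | rfl | omega | simp) | rfl | omega | simp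
      · rw [if_neg hlt, ih _ _ hm]
        refine Prod.ext ?_ ?_ <;> simp [cHit_cons, mval] <;> first | (split_ifs <;> first | rfl | omega | simp) | rfl | omega | simp
    rw [if_neg h6]
    by_cases h7 : "rumination" = c
    · subst h7
      rw [if_pos rfl]
      simp only []
      rw [if_neg (by decide)]
      by_cases hlt : (2:Int) < m
      · rw [if_pos hlt, ih _ _ (by omega)]
        refine Prod.ext ?_ ?_ <;> simp [cHit_cons, mval] <;> first | (split_ifs <;> first | rfl | omega | simp) | rfl | omega | simp
      · rw [if_neg hlt, ih _ _ hm]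
        refine Prod.ext ?_ ?_ <;> simp [cHit_cons, mval] <;> first | (split_ifs <;> first | rfl | omega | simp) | rfl | omega | simp
    rw [if_neg h7]
    by_cases h8 : "values" = c
    · subst h8
      rw [if_pos rfl]
      simp only []
      rw [if_neg (by decide)]
      by_cases hlt : (3:Int) < m
      · rw [if_pos hlt, ih _ _ (by omega)]
        refine Prod.ext ?_ ?_ <;> simp [cHit_cons, mval] <;> first | (split_ifs <;> first | rfl | omega | simp) | rfl | omega | simp
      · rw [if_neg hlt, ih _ _ hm]
        refine Prod.ext ?_ ?_ <;> simp [cHit_cons, mval] <;> first | (split_ifs <;> first | rfl | omega | simp) | rfl | omega | simp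
    rw [if_neg h8]
    by_cases h9 : "meaning" = c
    · subst h9
      rw [if_pos rfl]
      simp only []
      rw [if_neg (by decide)]
      by_cases hlt : (3:Int) < m
      · rw [if_pos hlt, ih _ _ (by omega)]
        refine Prod.ext ?_ ?_ <;> simp [cHit_cons, mval] <;> first | (split_ifs <;> first | rfl | omega | simp) | rfl | omega | simp
      · rw [if_neg hlt, ih _ _ hm]
        refine Prod.ext ?_ ?_ <;> simp [cHit_cons, mval] <;> first | (split_ifs <;> first | rfl | omega | simp) | rfl | omega | simp
    rw [if_neg h9]
    by_cases h10 : "catastrophizing" = c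
    · subst h10
      rw [if_pos rfl]
      simp only []
      rw [if_neg (by decide)]
      by_cases hlt : (4:Int) < m
      · rw [if_pos hlt, ih _ _ (by omega)]
        refine Prod.ext ?_ ?_ <;> simp [cHit_cons, mval] <;> first | (split_ifs <;> first | rfl | omega | simp) | rfl | omega | simp
      · rw [if_neg hlt, ih _ _ hm]
        refine Prod.ext ?_ ?_ <;> simp [cHit_cons, mval] <;> first | (split_ifs <;> first | rfl | omega | simp) | rfl | omega | simp
    rw [if_neg h10]
    by_cases h11 : "fusion" = c
    · subst h11
      rw [if_pos rfl]
      simp only []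
      rw [if_neg (by decide)]
      by_cases hlt : (4:Int) < m
      · rw [if_pos hlt, ih _ _ (by omega)]
        refine Prod.ext ?_ ?_ <;> simp [cHit_cons, mval] <;> first | (split_ifs <;> first | rfl | omega | simp) | rfl | omega | simp
      · rw [if_neg hlt, ih _ _ hm]
        refine Prod.ext ?_ ?_ <;> simp [cHit_cons, mval] <;> first | (split_ifs <;> first | rfl | omega | simp) | rfl | omega | simp
    rw [if_neg h11]
    by_cases h12 : "prediction" = c
    · subst h12
      rw [if_pos rfl]
      simp only []
      rw [if_neg (by decide)]
      by_cases hlt : (4:Int) < m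
      · rw [if_pos hlt, ih _ _ (by omega)]
        refine Prod.ext ?_ ?_ <;> simp [cHit_cons, mval] <;> first | (split_ifs <;> first | rfl | omega | simp) | rfl | omega | simp
      · rw [if_neg hlt, ih _ _ hm]
        refine Prod.ext ?_ ?_ <;> simp [cHit_cons, mval] <;> first | (split_ifs <;> first | rfl | omega | simp) | rfl | omega | simp
    rw [if_neg h12]
    simp only []
    rw [ih _ _ hm]
    refine Prod.ext ?_ ?_ <;>
      simp [cHit_cons, mval, Ne.symm h0, Ne.symm h1, Ne.symm h2, Ne.symm h3, Ne.symm h4,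
        Ne.symm h5, Ne.symm h6, Ne.symm h7, Ne.symm h8, Ne.symm h9, Ne.symm h10, Ne.symm h11,
        Ne.symm h12]

-- ===== VERDICT (by name: the statement is the Claim_ definition above) =====
set_option maxHeartbeats 4000000 in
theorem select_hexaflex_process_spec : Claim_equal_select_hexaflex_process := by
  intro thought categories _
  show select_hexaflex_process thought categories = select_hexaflex_process_alt thought categories
  simp only [select_hexaflex_process, select_hexaflex_process_alt]
  rw [foldl_catRule categories false 5 (by omega)]
  have hmv := mval_bounds categories
  have hmin : min (5:Int) (mval categories) = mval categories := by omega
  cases hp0 : (["i am", "i'm broken", "i'm damaged"].any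
      (fun phrase => PySem.Str.isIn phrase (PySem.Str.lower thought))) <;>
  cases hc0 : cHit categories ["identity", "self-concept"] <;>
  cases hp1 : (["can't stand", "can't handle", "too much", "unbearable"].any
      (fun phrase => PySem.Str.isIn phrase (PySem.Str.lower thought))) <;>
  cases hp3 : (["what's the point", "why bother", "doesn't matter"].any
      (fun phrase => PySem.Str.isIn phrase (PySem.Str.lower thought))) <;>
  cases hc1 : cHit categories ["avoidance", "struggle"] <;>
  cases hc2 : cHit categories ["future", "worry", "past", "rumination"] <;>
  cases hc3 : cHit categories ["values", "meaning"] <;>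
  cases hc4 : cHit categories ["catastrophizing", "fusion", "prediction"] <;>
  simp_all [cHit, mval, PySem.List.pyGetD] <;> decide
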